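-- pv_equiv track=rewrite | github.com/TheConner/X-MAP | code/xmap/core/baselinerClean.py | remove_invalid
-- ===== SOURCE A (Python) =====
-- def remove_invalid(iterators):
--     """remove invalid rating, e.g., old or duplicate.
--     iterators is a set of line in the form of [uid, (iid, rating, time)*].
--     """
--     def check_invalid(line, tmpdict):
--         """check data and update invalid data.
--         e.g., we only use latest data.
--         """
--         iid, rating, time = line
--         if time > tmpdict[iid][2]:
--             tmpdict[iid] = line
--         return tmpdict
--
--     for uid, ratings in iterators:
--         tmpdict = {}
--         for token in ratings:
--             # token: in the form of (iid, rating, time)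
--             if token[0] in tmpdict.keys():
--                 tmpdict = check_invalid(token, tmpdict)
--             else:
--                 tmpdict[token[0]] = token
--         yield uid, list(tmpdict.values())
-- ===== SOURCE B (Python) =====
-- def remove_invalid(iterators):
--     """Dict-free re-implementation: repeatedly take the first remaining
--     token's iid, scan the rest of the list for a strictly later rating of
--     that iid (first maximum wins, matching the strict '>' rule), emit it,
--     and drop every token of that iid before continuing.  Output order is
--     first-appearance order of the iids, like dict insertion order."""
--     for uid, ratings in iterators:
--         out = []
--         rest = ratings
--         while rest:
--             k = rest[0][0]
--             best = rest[0]
--             for s in rest[1:]: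
--                 if s[0] == k and s[2] > best[2]:
--                     best = s
--             out.append(best)
--             rest = [s for s in rest[1:] if s[0] != k]
--         yield uid, out
-- ===== Notes on version B (the rewrite author's own statement) =====
-- stated objective: alternative
-- what changed: Replaces A's single-pass dict of latest ratings with a dict-free repeated-extraction loop: take the first remaining token's iid, scan the remainder for a strictly later rating of that iid, emit it, and filter that iid out before continuing (O(n*d) scans instead of dict lookups).
import Mathlib
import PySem

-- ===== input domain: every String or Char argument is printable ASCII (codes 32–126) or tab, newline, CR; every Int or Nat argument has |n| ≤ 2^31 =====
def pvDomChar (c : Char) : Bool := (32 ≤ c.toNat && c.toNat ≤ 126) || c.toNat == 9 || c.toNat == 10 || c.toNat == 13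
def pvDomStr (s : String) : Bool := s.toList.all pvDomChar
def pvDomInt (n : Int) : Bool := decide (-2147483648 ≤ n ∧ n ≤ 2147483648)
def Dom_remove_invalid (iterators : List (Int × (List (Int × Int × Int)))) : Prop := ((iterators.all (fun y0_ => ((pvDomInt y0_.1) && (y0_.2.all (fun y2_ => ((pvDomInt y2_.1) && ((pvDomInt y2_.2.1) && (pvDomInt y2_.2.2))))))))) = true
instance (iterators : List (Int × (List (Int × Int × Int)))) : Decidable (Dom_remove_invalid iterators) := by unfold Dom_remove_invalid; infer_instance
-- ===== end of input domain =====

-- B replaces A's dict of latest ratings with a dict-free repeated-extraction loop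
-- (scan the remainder for the first time-maximal token of the leading iid, then
-- filter that iid out and continue); not claimed faster.  A is a generator, so the
-- equivalence is about the yielded sequence as a list.

-- ===== PORT A =====
-- one token step of A's inner loop: membership test, then check_invalid or plain insert
def rvStepA (d : PySem.Dict Int (Int × Int × Int)) (t : Int × Int × Int) :
    PySem.Dict Int (Int × Int × Int) :=
  if d.contains t.1 then
    -- check_invalid: tmpdict[iid] exists here (the contains guard just fired)
    match d.get? t.1 with
    | some cur => if t.2.2 > cur.2.2 then d.insert t.1 t else d
    | none => d
  else d.insert t.1 t

def remove_invalid (iterators : List (Int × (List (Int × Int × Int)))) : List (Int × (List (Int × Int × Int))) :=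
  iterators.map (fun ur =>
    let tmpdict := ur.2.foldl rvStepA PySem.Dict.empty
    (ur.1, tmpdict.values))

-- ===== PORT B =====
-- B's inner for-loop: scan rest for a strictly later rating of iid k
def rvScanBest (k : Int) (best : Int × Int × Int) (rest : List (Int × Int × Int)) :
    Int × Int × Int :=
  rest.foldl (fun best s => if s.1 = k ∧ s.2.2 > best.2.2 then s else best) best

-- B's while-loop, as the obvious structural recursion (rest strictly shrinks)
def rvKeep : List (Int × Int × Int) → List (Int × Int × Int)
  | [] => []
  | t :: rest =>
      rvScanBest t.1 t rest :: rvKeep (rest.filter (fun s => s.1 ≠ t.1))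
termination_by l => l.length
decreasing_by
  simp only [List.length_cons, List.length_unattach]
  exact Nat.lt_succ_of_le ((List.length_filter_le _ _).trans (by simp))

def remove_invalid_alt (iterators : List (Int × (List (Int × Int × Int)))) : List (Int × (List (Int × Int × Int))) :=
  iterators.map (fun ur => (ur.1, rvKeep ur.2))

-- ===== PRECONDITION & SPEC =====
def Spec_remove_invalid (iterators : List (Int × (List (Int × Int × Int)))) (out : List (Int × (List (Int × Int × Int)))) : Prop := out = remove_invalid_alt iterators
instance (iterators : List (Int × (List (Int × Int × Int)))) (out : List (Int × (List (Int × Int × Int)))) : Decidable (Spec_remove_invalid iterators out) := by unfold Spec_remove_invalid; infer_instance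

-- ===== CLAIM (what is proved, stated in full; the proofs are below) =====
def Claim_equal_remove_invalid : Prop := ∀ (iterators : List (Int × (List (Int × Int × Int)))), Dom_remove_invalid iterators → Spec_remove_invalid iterators (remove_invalid iterators)

-- ===== LEMMAS AND PROOFS =====

-- the common specification both sides are proved equal to: first-appearance key
-- order, and per key the first token attaining the maximal time (strict '>')
def rvStep (k : Int) (acc : Option (Int × Int × Int)) (s : Int × Int × Int) :
    Option (Int × Int × Int) :=
  if s.1 = k then
    match acc with
    | none => some s
    | some b => if s.2.2 > b.2.2 then some s else some b
  else acc

def rvBest (k : Int) (l : List (Int × Int × Int)) : Option (Int × Int × Int) :=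
  l.foldl (rvStep k) none

def rvKeys : List (Int × Int × Int) → List Int
  | [] => []
  | t :: rest => t.1 :: rvKeys (rest.filter (fun s => s.1 ≠ t.1))
termination_by l => l.length
decreasing_by
  simp only [List.length_cons, List.length_unattach]
  exact Nat.lt_succ_of_le ((List.length_filter_le _ _).trans (by simp))

def rvSpec (l : List (Int × Int × Int)) : List (Int × (Int × Int × Int)) :=
  (rvKeys l).map (fun k => (k, (rvBest k l).getD (0, 0, 0)))

theorem mem_rvKeys (l : List (Int × Int × Int)) (k : Int) :
    k ∈ rvKeys l ↔ ∃ x ∈ l, x.1 = k := by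
  cases l with
  | nil => simp [rvKeys]
  | cons t rest =>
    rw [rvKeys]
    simp only [List.mem_cons, mem_rvKeys (rest.filter (fun s => s.1 ≠ t.1)) k]
    constructor
    · rintro (rfl | ⟨x, hx, rfl⟩)
      · exact ⟨t, by simp⟩
      · exact ⟨x, by simp [(List.mem_filter.mp hx).1]⟩
    · rintro ⟨x, hx, rfl⟩
      rcases hx with rfl | hx
      · left; rfl
      · by_cases hk : x.1 = t.1
        · left; exact hk
        · right; exact ⟨x, List.mem_filter.mpr ⟨hx, by simp [hk]⟩, rfl⟩
termination_by l.length
decreasing_by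
  simp only [List.length_cons]
  exact Nat.lt_succ_of_le (List.length_filter_le _ _)

theorem nodup_rvKeys (l : List (Int × Int × Int)) : (rvKeys l).Nodup := by
  cases l with
  | nil => simp [rvKeys]
  | cons t rest =>
    rw [rvKeys]
    refine List.nodup_cons.mpr ⟨?_, nodup_rvKeys _⟩
    rw [mem_rvKeys]
    rintro ⟨x, hx, hxt⟩
    exact absurd hxt (by simpa using (List.mem_filter.mp hx).2)
termination_by l.length
decreasing_by
  simp only [List.length_cons]
  exact Nat.lt_succ_of_le (List.length_filter_le _ _)

theorem foldl_rvStep_some (k : Int) (b : Int × Int × Int) (l : List (Int × Int × Int)) :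
    l.foldl (rvStep k) (some b) = some (rvScanBest k b l) := by
  induction l generalizing b with
  | nil => rfl
  | cons s r ih =>
    simp only [List.foldl_cons, rvScanBest, rvStep]
    by_cases h1 : s.1 = k
    · by_cases h2 : s.2.2 > b.2.2 <;> simp [h1, h2, ih, rvScanBest]
    · simp [h1, ih, rvScanBest]

theorem foldl_rvStep_filter (k k0 : Int) (acc : Option (Int × Int × Int))
    (l : List (Int × Int × Int)) (h : k ≠ k0) :
    (l.filter (fun s => s.1 ≠ k0)).foldl (rvStep k) acc = l.foldl (rvStep k) acc := by
  induction l generalizing acc with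
  | nil => rfl
  | cons s r ih =>
    rw [List.filter_cons]
    by_cases hs : s.1 = k0
    · have hstep : rvStep k acc s = acc := by simp [rvStep, hs, h.symm]
      rw [if_neg (by simp [hs]), ih, List.foldl_cons, hstep]
    · rw [if_pos (by simp [hs]), List.foldl_cons, List.foldl_cons, ih]

theorem rvBest_congr_no_key (k : Int) (l : List (Int × Int × Int)) (acc : Option (Int × Int × Int))
    (h : ¬ ∃ x ∈ l, x.1 = k) : l.foldl (rvStep k) acc = acc := by
  induction l generalizing acc with
  | nil => rfl
  | cons s r ih =>
    push Not at h
    have hs : s.1 ≠ k := h s (by simp)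
    simp only [List.foldl_cons, rvStep, hs, if_false]
    exact ih _ (by rintro ⟨x, hx, rfl⟩; exact (h x (by simp [hx])) rfl)

theorem rvBest_none (k : Int) (l : List (Int × Int × Int)) (h : ¬ ∃ x ∈ l, x.1 = k) :
    rvBest k l = none := rvBest_congr_no_key k l none h

theorem rvBest_isSome (k : Int) (l : List (Int × Int × Int)) (h : ∃ x ∈ l, x.1 = k) :
    (rvBest k l).isSome := by
  unfold rvBest
  induction l with
  | nil => simp at h
  | cons s r ih =>
    by_cases hs : s.1 = k
    · have : rvStep k none s = some s := by simp [rvStep, hs]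
      simp [this, foldl_rvStep_some]
    · obtain ⟨x, hx, hk⟩ := h
      rcases List.mem_cons.mp hx with rfl | hx
      · exact absurd hk hs
      · have : rvStep k none s = none := by simp [rvStep, hs]
        simpa [this] using ih ⟨x, hx, hk⟩

theorem rvKeys_append (l : List (Int × Int × Int)) (t : Int × Int × Int) :
    rvKeys (l ++ [t]) = if ∃ x ∈ l, x.1 = t.1 then rvKeys l else rvKeys l ++ [t.1] := by
  cases l with
  | nil => simp [rvKeys]
  | cons s r =>
    rw [List.cons_append, rvKeys, rvKeys, List.filter_append]
    by_cases hts : t.1 = s.1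
    · rw [if_pos ⟨s, by simp, hts.symm⟩]
      simp [hts]
    · have hfil : List.filter (fun x => decide (x.1 ≠ s.1)) [t] = [t] := by simp [hts]
      rw [hfil, rvKeys_append (r.filter (fun x => x.1 ≠ s.1)) t]
      have hiff : (∃ x ∈ r.filter (fun x => decide (x.1 ≠ s.1)), x.1 = t.1) ↔ (∃ x ∈ s :: r, x.1 = t.1) := by
        constructor
        · rintro ⟨x, hx, hxt⟩; exact ⟨x, by simp [(List.mem_filter.mp hx).1], hxt⟩
        · rintro ⟨x, hx, hxt⟩
          rcases List.mem_cons.mp hx with rfl | hx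
          · exact absurd hxt (fun h => hts h.symm)
          · exact ⟨x, List.mem_filter.mpr ⟨hx, by simp [hxt, hts]⟩, hxt⟩
      by_cases hex : ∃ x ∈ s :: r, x.1 = t.1
      · rw [if_pos (hiff.mpr hex), if_pos hex]
      · rw [if_neg (fun h => hex (hiff.mp h)), if_neg hex]
        simp
termination_by l.length
decreasing_by
  simp only [List.length_cons]
  exact Nat.lt_succ_of_le (List.length_filter_le _ _)

-- B equals the spec
theorem rvKeep_eq_spec (l : List (Int × Int × Int)) :
    rvKeep l = (rvSpec l).map (·.2) := by
  cases l with
  | nil => simp [rvKeep, rvSpec, rvKeys]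
  | cons t rest =>
    rw [rvKeep, rvSpec, rvKeys, List.map_cons, List.map_cons]
    have hhead : rvBest t.1 (t :: rest) = some (rvScanBest t.1 t rest) := by
      unfold rvBest
      rw [List.foldl_cons]
      have : rvStep t.1 none t = some t := by simp [rvStep]
      rw [this, foldl_rvStep_some]
    rw [rvKeep_eq_spec (rest.filter (fun s => s.1 ≠ t.1)), rvSpec]
    simp only [List.map_map, hhead, Option.getD_some]
    refine congrArg _ ?_
    refine List.map_congr_left (fun k hk => ?_)
    have hkne : k ≠ t.1 := by
      rw [mem_rvKeys] at hk
      obtain ⟨x, hx, rfl⟩ := hk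
      simpa using (List.mem_filter.mp hx).2
    have h1 : rvBest k (t :: rest) = rvBest k rest := by
      unfold rvBest
      rw [List.foldl_cons]
      have hne : ¬ t.1 = k := fun h => hkne h.symm
      have : rvStep k none t = none := by simp [rvStep, hne]
      rw [this]
    have h2 : rvBest k (rest.filter (fun s => s.1 ≠ t.1)) = rvBest k rest :=
      foldl_rvStep_filter k t.1 none rest hkne
    simp only [Function.comp_apply, h1, h2]
termination_by l.length
decreasing_by
  simp only [List.length_cons]
  exact Nat.lt_succ_of_le (List.length_filter_le _ _)

theorem rvStep_ne (k : Int) (acc : Option (Int × Int × Int)) (s : Int × Int × Int)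
    (h : ¬ s.1 = k) : rvStep k acc s = acc := by simp [rvStep, h]

theorem rvStep_eq_some (k : Int) (b s : Int × Int × Int) (h : s.1 = k) :
    rvStep k (some b) s = if s.2.2 > b.2.2 then some s else some b := by simp [rvStep, h]

theorem rvStep_eq_none (k : Int) (s : Int × Int × Int) (h : s.1 = k) :
    rvStep k none s = some s := by simp [rvStep, h]

-- A equals the spec
theorem rvFoldA_eq_spec (l : List (Int × Int × Int)) :
    (l.foldl rvStepA PySem.Dict.empty).items = rvSpec l := by
  induction l using List.reverseRecOn with
  | nil =>
    rw [List.foldl_nil, rvSpec, rvKeys]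
    rfl
  | append_singleton l t ih =>
    rw [List.foldl_append, List.foldl_cons, List.foldl_nil]
    set d := l.foldl rvStepA PySem.Dict.empty with hd
    have hkeys : d.keys = rvKeys l := by
      simp only [PySem.Dict.keys, ih, rvSpec, List.map_map]
      exact List.map_congr_left (fun k _ => rfl) |>.trans (List.map_id _)
    have hnd : d.keys.Nodup := by rw [hkeys]; exact nodup_rvKeys l
    have hbstep : ∀ k, rvBest k (l ++ [t]) = rvStep k (rvBest k l) t := by
      intro k; unfold rvBest; rw [List.foldl_append, List.foldl_cons, List.foldl_nil]
    by_cases hex : ∃ x ∈ l, x.1 = t.1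
    · -- key already present
      have hmem : t.1 ∈ rvKeys l := (mem_rvKeys l t.1).mpr hex
      have hcont : d.contains t.1 = true := by
        rw [PySem.Dict.contains_eq_decide_mem_keys, hkeys]
        simpa using hmem
      obtain ⟨b, hb⟩ := Option.isSome_iff_exists.mp (rvBest_isSome t.1 l hex)
      have hitem : (t.1, (rvBest t.1 l).getD (0, 0, 0)) ∈ d.items := by
        rw [ih, rvSpec]
        exact List.mem_map.mpr ⟨t.1, hmem, rfl⟩
      have hget : d.get? t.1 = some b := by
        have := PySem.Dict.get?_of_mem_items _ hitem hnd
        rwa [hb, Option.getD_some] at this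
      rw [rvStepA, if_pos hcont, hget]
      have hmatch : (match some b with
          | some cur => if t.2.2 > cur.2.2 then d.insert t.1 t else d
          | none => d) = if t.2.2 > b.2.2 then d.insert t.1 t else d := rfl
      rw [hmatch]
      rw [rvSpec, rvKeys_append, if_pos hex]
      by_cases hgt : t.2.2 > b.2.2
      · rw [if_pos hgt, PySem.Dict.items_insert_of_contains _ _ hcont, ih, rvSpec, List.map_map]
        refine List.map_congr_left (fun k hk => ?_)
        simp only [Function.comp_apply]
        by_cases hkt : k = t.1
        · subst hkt
          rw [if_pos (by simp)]
          rw [hbstep, hb, rvStep_eq_some _ _ _ rfl]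
          simp [hgt]
        · rw [if_neg (by simpa using hkt)]
          rw [hbstep, rvStep_ne _ _ _ (fun h => hkt h.symm)]
      · rw [if_neg hgt, ih, rvSpec]
        refine List.map_congr_left (fun k hk => ?_)
        by_cases hkt : k = t.1
        · subst hkt
          rw [hbstep, hb, rvStep_eq_some _ _ _ rfl]
          simp [hgt]
        · rw [hbstep, rvStep_ne _ _ _ (fun h => hkt h.symm)]
    · -- fresh key
      have hmem : t.1 ∉ rvKeys l := fun h => hex ((mem_rvKeys l t.1).mp h)
      have hcont : d.contains t.1 = false := by
        rw [PySem.Dict.contains_eq_decide_mem_keys, hkeys]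
        simpa using hmem
      rw [rvStepA, if_neg (by simp [hcont]), PySem.Dict.items_insert_of_not_contains _ _ hcont, ih]
      simp only [rvSpec]
      rw [rvKeys_append, if_neg hex, List.map_append]
      refine congrArg₂ _ ?_ ?_
      · refine List.map_congr_left (fun k hk => ?_)
        have hkt : k ≠ t.1 := fun h => hmem (h ▸ hk)
        rw [hbstep, rvStep_ne _ _ _ (fun h => hkt h.symm)]
      · rw [List.map_singleton, hbstep, rvBest_none t.1 l hex, rvStep_eq_none _ _ rfl]
        rfl

-- ===== VERDICT (by name: the statement is the Claim_ definition above) =====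
theorem remove_invalid_spec : Claim_equal_remove_invalid := by
  intro iterators _
  unfold Spec_remove_invalid remove_invalid remove_invalid_alt
  refine (List.map_congr_left (fun ur _ => ?_)).symm
  have h := rvFoldA_eq_spec ur.2
  simp only [PySem.Dict.values, h, rvKeep_eq_spec]
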